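-- pv_equiv track=rewrite | github.com/blueraina/astrbot_plugin_mathsolve | main.py | _ensure_balanced_dollar_math
-- ===== SOURCE A (Python) =====
-- from typing import List, Dict, Any, Optional, Union, Tuple
--
-- def _is_char_escaped_by_backslash(s: str, pos: int) -> bool:
--     """判断 s[pos] 这个字符是否被前面的反斜杠转义（\\）。"""
--     if pos <= 0:
--         return False
--     cnt = 0
--     j = pos - 1
--     while j >= 0 and s[j] == "\\":
--         cnt += 1
--         j -= 1
--     return (cnt % 2) == 1
--
-- def _ensure_balanced_dollar_math(s: str) -> str:
--     """兜底用：若 $ 分隔符不成对，则把所有未转义的 $ 变为 \\$，避免编译报错。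
--
--     仅在 PDF 编译失败后的“强转义兜底”路径使用，尽量不影响正常数学渲染。
--     """
--     if not s:
--         return ""
--     s = str(s)
--     cnt = 0
--     i = 0
--     while i < len(s):
--         ch = s[i]
--         if ch == "$" and not _is_char_escaped_by_backslash(s, i):
--             if i + 1 < len(s) and s[i + 1] == "$" and not _is_char_escaped_by_backslash(s, i + 1):
--                 cnt += 2
--                 i += 2
--             else:
--                 cnt += 1
--                 i += 1
--         else:
--             i += 1
--
--     if cnt % 2 == 0:
--         return s
--
--     # 不成对：全部转义成 \$
--     out: List[str] = []
--     i = 0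
--     while i < len(s):
--         if s[i] == "$" and not _is_char_escaped_by_backslash(s, i):
--             out.append(r"\$")
--             i += 1
--         else:
--             out.append(s[i])
--             i += 1
--     return "".join(out)
-- ===== SOURCE B (Python) =====
-- def _ensure_balanced_dollar_math(s: str) -> str:
--     """Single forward pass tracking consecutive-backslash run length; escape all
--     unescaped $ when their count is odd. O(n) instead of A's backward rescans."""
--     if not s:
--         return ""
--     bs = 0
--     unescaped = 0
--     for ch in s:
--         if ch == "\\":
--             bs += 1
--         else:
--             if ch == "$" and bs % 2 == 0:
--                 unescaped += 1
--             bs = 0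
--     if unescaped % 2 == 0:
--         return s
--     out = []
--     bs = 0
--     for ch in s:
--         if ch == "\\":
--             bs += 1
--             out.append(ch)
--         else:
--             if ch == "$" and bs % 2 == 0:
--                 out.append("\\$")
--             else:
--                 out.append(ch)
--             bs = 0
--     return "".join(out)
-- ===== Notes on version B (the rewrite author's own statement) =====
-- stated objective: faster
-- what changed: Replaces A's per-$ backward backslash rescan (and two-pass index loop with $$-pair skipping) by a single forward pass that tracks the current consecutive-backslash run length, counting unescaped $ directly.
import Mathlib
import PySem

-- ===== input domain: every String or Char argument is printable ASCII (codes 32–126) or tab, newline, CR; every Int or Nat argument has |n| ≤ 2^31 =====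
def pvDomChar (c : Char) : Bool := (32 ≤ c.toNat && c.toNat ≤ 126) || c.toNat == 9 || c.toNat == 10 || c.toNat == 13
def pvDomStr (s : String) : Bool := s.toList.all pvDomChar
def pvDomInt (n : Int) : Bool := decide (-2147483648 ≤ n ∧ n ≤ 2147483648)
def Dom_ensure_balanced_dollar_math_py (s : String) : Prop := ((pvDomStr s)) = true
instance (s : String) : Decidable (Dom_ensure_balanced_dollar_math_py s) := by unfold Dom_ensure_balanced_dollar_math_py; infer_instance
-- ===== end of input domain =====

-- B replaces A's per-$ backward backslash rescans by one O(n) forward pass tracking the backslash-run length.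

-- ===== PORT A =====
-- `_is_char_escaped_by_backslash`'s backward while-loop counting backslashes at j, j-1, …
-- (both call sites pass a loop index, so pos is ported as Nat; `pos <= 0` becomes `pos = 0`).
def pvBsCount (l : List Char) : Nat → Nat
  | 0 => if l.getD 0 ' ' == '\\' then 1 else 0
  | j+1 => if l.getD (j+1) ' ' == '\\' then 1 + pvBsCount l j else 0

def pvIsEscaped (l : List Char) (pos : Nat) : Bool :=
  match pos with
  | 0 => false
  | p+1 => pvBsCount l p % 2 == 1

-- A's first while-loop: count unescaped '$', consuming '$$' pairs two at a time.
def pvCntLoopA (l : List Char) (i : Nat) : Nat :=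
  if i < l.length then
    if l.getD i ' ' == '$' && !pvIsEscaped l i then
      if i + 1 < l.length && l.getD (i+1) ' ' == '$' && !pvIsEscaped l (i+1) then
        2 + pvCntLoopA l (i+2)
      else
        1 + pvCntLoopA l (i+1)
    else pvCntLoopA l (i+1)
  else 0
termination_by l.length - i

-- A's second while-loop: rebuild, escaping each unescaped '$'.
def pvOutLoopA (l : List Char) (i : Nat) : List Char :=
  if i < l.length then
    if l.getD i ' ' == '$' && !pvIsEscaped l i then
      '\\' :: '$' :: pvOutLoopA l (i+1)
    else
      l.getD i ' ' :: pvOutLoopA l (i+1)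
  else []
termination_by l.length - i

def ensure_balanced_dollar_math_py (s : String) : String :=
  if s.toList.isEmpty then ""
  else if pvCntLoopA s.toList 0 % 2 == 0 then s
  else String.ofList (pvOutLoopA s.toList 0)

-- ===== PORT B =====
-- first forward pass: bs = current consecutive-backslash run length, c = unescaped-$ count
def pvCntB : List Char → Nat → Nat → Nat
  | [], _, c => c
  | ch :: rest, bs, c =>
    if ch == '\\' then pvCntB rest (bs+1) c
    else pvCntB rest 0 (if ch == '$' && bs % 2 == 0 then c + 1 else c)

-- second forward pass: same state, building the escaped output
def pvOutB : List Char → Nat → List Char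
  | [], _ => []
  | ch :: rest, bs =>
    if ch == '\\' then ch :: pvOutB rest (bs+1)
    else (if ch == '$' && bs % 2 == 0 then ['\\', '$'] else [ch]) ++ pvOutB rest 0

def ensure_balanced_dollar_math_py_alt (s : String) : String :=
  if s.toList.isEmpty then ""
  else if pvCntB s.toList 0 0 % 2 == 0 then s
  else String.ofList (pvOutB s.toList 0)

-- ===== PRECONDITION & SPEC =====
def Spec_ensure_balanced_dollar_math_py (s : String) (out : String) : Prop := out = ensure_balanced_dollar_math_py_alt s
instance (s : String) (out : String) : Decidable (Spec_ensure_balanced_dollar_math_py s out) := by unfold Spec_ensure_balanced_dollar_math_py; infer_instance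

-- ===== CLAIM (what is proved, stated in full; the proofs are below) =====
def Claim_equal_ensure_balanced_dollar_math_py : Prop := ∀ (s : String), Dom_ensure_balanced_dollar_math_py s → Spec_ensure_balanced_dollar_math_py s (ensure_balanced_dollar_math_py s)

-- ===== LEMMAS AND PROOFS =====

-- run length of backslashes ending just before index i (B's forward state at i)
def pvRun (l : List Char) : Nat → Nat
  | 0 => 0
  | i+1 => pvBsCount l i

-- the per-index condition both programs test at i
def pvCond (l : List Char) (i : Nat) : Bool :=
  l.getD i ' ' == '$' && !pvIsEscaped l i

-- index-based count of indices ≥ i satisfying pvCond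
def pvCount (l : List Char) (i : Nat) : Nat :=
  if i < l.length then (if pvCond l i then 1 else 0) + pvCount l (i+1) else 0
termination_by l.length - i

lemma pvCond_iff (l : List Char) (i : Nat) :
    pvCond l i = (l.getD i ' ' == '$' && pvRun l i % 2 == 0) := by
  cases i with
  | zero => simp [pvCond, pvIsEscaped, pvRun]
  | succ p =>
    simp only [pvCond, pvIsEscaped, pvRun]
    cases h : pvBsCount l p % 2 == 1 <;> simp_all

lemma pvRun_succ (l : List Char) (i : Nat) :
    pvRun l (i+1) = if l.getD i ' ' == '\\' then pvRun l i + 1 else 0 := by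
  cases i with
  | zero =>
    show pvBsCount l 0 = _
    rw [pvBsCount]
    split <;> simp [pvRun]
  | succ p =>
    show pvBsCount l (p+1) = _
    rw [pvBsCount]
    split <;> simp [pvRun] <;> omega

lemma pvCntA_eq_count (l : List Char) (i : Nat) : pvCntLoopA l i = pvCount l i := by
  rw [pvCntLoopA, pvCount]
  by_cases hlt : i < l.length
  · rw [if_pos hlt, if_pos hlt]
    have ih1 : pvCntLoopA l (i+1) = pvCount l (i+1) := pvCntA_eq_count l (i+1)
    by_cases hc : (l.getD i ' ' == '$' && !pvIsEscaped l i) = true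
    · rw [if_pos hc]
      have hcond : pvCond l i = true := hc
      by_cases hp : (decide (i + 1 < l.length) && l.getD (i+1) ' ' == '$' && !pvIsEscaped l (i+1)) = true
      · rw [if_pos hp]
        have ih2 : pvCntLoopA l (i+2) = pvCount l (i+2) := pvCntA_eq_count l (i+2)
        have h1 : i + 1 < l.length := by
          have := (Bool.and_eq_true_iff.mp (Bool.and_eq_true_iff.mp hp).1).1
          exact of_decide_eq_true this
        have hc1 : pvCond l (i+1) = true := by
          have h2 := (Bool.and_eq_true_iff.mp (Bool.and_eq_true_iff.mp hp).1).2
          have h3 := (Bool.and_eq_true_iff.mp hp).2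
          unfold pvCond
          rw [h2, h3, Bool.true_and]
        conv_rhs => rw [pvCount]
        rw [if_pos h1, hcond, hc1]
        have h12 : i + 1 + 1 = i + 2 := rfl
        rw [h12, ih2]
        simp
        omega
      · rw [if_neg hp, ih1, hcond]
        simp
    · rw [if_neg hc, ih1]
      have hcond : pvCond l i = false := by
        unfold pvCond; exact Bool.not_eq_true _ ▸ Bool.eq_false_iff.mpr hc
      rw [hcond]
      simp
  · rw [if_neg hlt, if_neg hlt]
termination_by l.length - i

lemma pvCntB_eq_count (l : List Char) (i : Nat) (c : Nat) :
    pvCntB (l.drop i) (pvRun l i) c = c + pvCount l i := by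
  by_cases hlt : i < l.length
  · have hdrop : l.drop i = l[i] :: l.drop (i+1) := List.drop_eq_getElem_cons hlt
    have hgd : l.getD i ' ' = l[i] := List.getD_eq_getElem l ' ' hlt
    rw [hdrop, pvCntB]
    conv_rhs => rw [pvCount]
    rw [if_pos hlt]
    by_cases hbs : l[i] = '\\'
    · have hr : pvRun l (i+1) = pvRun l i + 1 := by
        rw [pvRun_succ, hgd, hbs]; simp
      have ih := pvCntB_eq_count l (i+1) c
      rw [hr] at ih
      rw [if_pos (by simp [hbs]), ih]
      have hcond : pvCond l i = false := by
        rw [pvCond_iff, hgd, hbs]; simp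
      rw [hcond]
      simp
    · have h0 : pvRun l (i+1) = 0 := by
        rw [pvRun_succ, hgd]; simp [hbs]
      rw [if_neg (by simp [hbs])]
      have hcnd : pvCond l i = (l[i] == '$' && pvRun l i % 2 == 0) := by
        rw [pvCond_iff, hgd]
      by_cases hch : (l[i] == '$' && pvRun l i % 2 == 0) = true
      · have ih := pvCntB_eq_count l (i+1) (c+1)
        rw [h0] at ih
        rw [if_pos hch, ih, hcnd, hch, if_pos rfl]
        omega
      · have ih := pvCntB_eq_count l (i+1) c
        rw [h0] at ih
        rw [if_neg hch, ih, hcnd, Bool.eq_false_iff.mpr hch]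
        simp
  · rw [List.drop_eq_nil_of_le (Nat.le_of_not_lt hlt), pvCntB, pvCount, if_neg hlt]
    omega
termination_by l.length - i

lemma pvOutB_eq_outA (l : List Char) (i : Nat) :
    pvOutB (l.drop i) (pvRun l i) = pvOutLoopA l i := by
  by_cases hlt : i < l.length
  · have hdrop : l.drop i = l[i] :: l.drop (i+1) := List.drop_eq_getElem_cons hlt
    have hgd : l.getD i ' ' = l[i] := List.getD_eq_getElem l ' ' hlt
    rw [hdrop, pvOutB]
    conv_rhs => rw [pvOutLoopA]
    rw [if_pos hlt]
    by_cases hbs : l[i] = '\\'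
    · have hr : pvRun l (i+1) = pvRun l i + 1 := by
        rw [pvRun_succ, hgd, hbs]; simp
      have ih := pvOutB_eq_outA l (i+1)
      rw [hr] at ih
      have hcnd : (l.getD i ' ' == '$' && !pvIsEscaped l i) = false := by
        have : pvCond l i = false := by rw [pvCond_iff, hgd, hbs]; simp
        exact this
      rw [if_pos (by simp [hbs]), ih, hcnd, if_neg (by simp), hgd, hbs]
    · have h0 : pvRun l (i+1) = 0 := by
        rw [pvRun_succ, hgd]; simp [hbs]
      have ih := pvOutB_eq_outA l (i+1)
      rw [h0] at ih
      rw [if_neg (by simp [hbs]), ih]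
      have hcnd : (l.getD i ' ' == '$' && !pvIsEscaped l i) = (l[i] == '$' && pvRun l i % 2 == 0) := by
        have := pvCond_iff l i
        unfold pvCond at this
        rw [this, hgd]
      rw [hcnd, hgd]
      by_cases hch : (l[i] == '$' && pvRun l i % 2 == 0) = true
      · rw [hch, if_pos rfl, if_pos rfl]; rfl
      · rw [Bool.eq_false_iff.mpr hch, if_neg (by simp), if_neg (by simp)]; rfl
  · rw [List.drop_eq_nil_of_le (Nat.le_of_not_lt hlt), pvOutB, pvOutLoopA, if_neg hlt]
termination_by l.length - i

-- ===== VERDICT (by name: the statement is the Claim_ definition above) =====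
theorem ensure_balanced_dollar_math_py_spec : Claim_equal_ensure_balanced_dollar_math_py := by
  intro s _
  show ensure_balanced_dollar_math_py s = ensure_balanced_dollar_math_py_alt s
  unfold ensure_balanced_dollar_math_py ensure_balanced_dollar_math_py_alt
  have hc : pvCntB s.toList 0 0 = pvCntLoopA s.toList 0 := by
    have h := pvCntB_eq_count s.toList 0 0
    simp only [List.drop_zero, pvRun, Nat.zero_add] at h
    rw [h, pvCntA_eq_count]
  have ho : pvOutB s.toList 0 = pvOutLoopA s.toList 0 := by
    have h := pvOutB_eq_outA s.toList 0
    simpa only [List.drop_zero, pvRun] using h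
  rw [hc, ho]
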